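-- pv_equiv track=rewrite | github.com/CristianEstMaida/Programacion_I | examen/biblioteca.py | encontrar_posicion_ocurrencias
-- ===== SOURCE A (Python) =====
-- def determinar_repetidos(lista:list, valor:int)->int:
--     '''
--     La funcion cuenta la cantidad de elementos de una lista que repiten un
--     valor.
--     Recibe la lista (list) y el valor (int).
--     Retorna la cantidad.
--     '''
--     contador = 0
--     for elemento in lista:
--         if elemento == valor:
--             contador += 1
--     return contador
--
-- def encontrar_posicion_ocurrencias(lista:list, criterio:str)->int:
--     '''
--     La funcion encuentra la posicion del elemento que tiene mas ocurrencias.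
--     Recibe la lista (list).
--     Retorna la posicion.
--     '''
--     contador = 0
--     maximo = None
--     minimo = None
--     posicion = 0
--     for elemento in lista:
--         valor = determinar_repetidos(lista, elemento)
--         if criterio == "max":
--             if maximo == None or valor > maximo:
--                 maximo = valor
--                 posicion = contador
--         elif criterio == "min":
--             if minimo == None or valor < minimo:
--                 minimo = valor
--                 posicion = contador
--         contador += 1
--     return posicion
-- ===== SOURCE B (Python) =====
-- def encontrar_posicion_ocurrencias(lista: list, criterio: str) -> int:
--     '''
--     Posicion del elemento con mas ("max") / menos ("min") ocurrencias.
--     One counting pass + extremum of the count table + first-match scan (O(n)),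
--     instead of recounting the whole list for every element (O(n^2)).
--     '''
--     if not lista or criterio not in ("max", "min"):
--         return 0
--     counts = {}
--     for x in lista:
--         counts[x] = counts.get(x, 0) + 1
--     target = max(counts.values()) if criterio == "max" else min(counts.values())
--     for i, x in enumerate(lista):
--         if counts[x] == target:
--             return i
--     return 0
-- ===== Notes on version B (the rewrite author's own statement) =====
-- stated objective: faster
-- what changed: Replaces A's quadratic scan (recount the whole list for every element while tracking a running extremum and its position) by a phase-separated linear algorithm: build a count table in one pass, take max/min of the table's values, then return the first index whose count equals that target.
import Mathlib
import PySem

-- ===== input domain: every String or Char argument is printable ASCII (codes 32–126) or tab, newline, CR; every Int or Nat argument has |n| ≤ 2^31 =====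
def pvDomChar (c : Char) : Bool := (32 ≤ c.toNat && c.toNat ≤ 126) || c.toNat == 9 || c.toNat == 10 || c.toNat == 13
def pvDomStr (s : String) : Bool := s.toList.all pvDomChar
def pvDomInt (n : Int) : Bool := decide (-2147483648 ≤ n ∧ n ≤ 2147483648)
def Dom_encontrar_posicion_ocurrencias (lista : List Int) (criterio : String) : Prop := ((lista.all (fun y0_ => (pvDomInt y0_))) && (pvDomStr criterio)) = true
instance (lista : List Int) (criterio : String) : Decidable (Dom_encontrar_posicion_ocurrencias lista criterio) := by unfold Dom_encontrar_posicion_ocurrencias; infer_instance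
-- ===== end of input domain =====

-- B replaces A's quadratic recount-per-element running-extremum scan by a linear
-- count-table + extremum-of-counts + first-match-scan decomposition (measured faster).


-- ===== PORT A =====
def determinar_repetidos (lista : List Int) (valor : Int) : Int :=
  lista.foldl (fun contador elemento => if elemento == valor then contador + 1 else contador) 0

-- loop body of A (state: contador, maximo, minimo, posicion)
def pasoA (lista : List Int) (criterio : String)
    (s : Int × Option Int × Option Int × Int) (elemento : Int) :
    Int × Option Int × Option Int × Int :=
  let contador := s.1
  let maximo := s.2.1
  let minimo := s.2.2.1
  let posicion := s.2.2.2
  let valor := determinar_repetidos lista elemento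
  if criterio == "max" then
    match maximo with
    | none => (contador + 1, some valor, minimo, contador)
    | some m =>
      if valor > m then (contador + 1, some valor, minimo, contador)
      else (contador + 1, maximo, minimo, posicion)
  else if criterio == "min" then
    match minimo with
    | none => (contador + 1, maximo, some valor, contador)
    | some m =>
      if valor < m then (contador + 1, maximo, some valor, contador)
      else (contador + 1, maximo, minimo, posicion)
  else (contador + 1, maximo, minimo, posicion)

def encontrar_posicion_ocurrencias (lista : List Int) (criterio : String) : Int :=
  (lista.foldl (pasoA lista criterio) (0, none, none, 0)).2.2.2

-- ===== PORT B =====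
-- second pass of Source B: first index i with counts[lista[i]] == target
def pvFindTarget (counts : PySem.Dict Int Int) (target : Int) : List Int → Int → Int
  | [], _ => 0
  | x :: rest, i => if counts.getD x 0 == target then i else pvFindTarget counts target rest (i + 1)

def encontrar_posicion_ocurrencias_alt (lista : List Int) (criterio : String) : Int :=
  if lista.isEmpty || !(criterio == "max" || criterio == "min") then 0
  else
    let counts := lista.foldl (fun d x => d.insert x (d.getD x 0 + 1)) PySem.Dict.empty
    let target := if criterio == "max" then (PySem.List.max? counts.values (fun v => v)).getD 0
                  else (PySem.List.min? counts.values (fun v => v)).getD 0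
    pvFindTarget counts target lista 0

-- ===== PRECONDITION & SPEC =====
def Spec_encontrar_posicion_ocurrencias (lista : List Int) (criterio : String) (out : Int) : Prop := out = encontrar_posicion_ocurrencias_alt lista criterio
instance (lista : List Int) (criterio : String) (out : Int) : Decidable (Spec_encontrar_posicion_ocurrencias lista criterio out) := by unfold Spec_encontrar_posicion_ocurrencias; infer_instance

-- ===== CLAIM (what is proved, stated in full; the proofs are below) =====
def Claim_equal_encontrar_posicion_ocurrencias : Prop := ∀ (lista : List Int) (criterio : String), Dom_encontrar_posicion_ocurrencias lista criterio → Spec_encontrar_posicion_ocurrencias lista criterio (encontrar_posicion_ocurrencias lista criterio)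

-- ===== LEMMAS AND PROOFS =====

-- determinar_repetidos counts occurrences
theorem foldl_count_aux (v : Int) : ∀ (l : List Int) (c : Int),
    l.foldl (fun contador elemento => if elemento == v then contador + 1 else contador) c
      = c + l.count v := by
  intro l
  induction l with
  | nil => intro c; simp
  | cons e t ih =>
    intro c
    simp only [List.foldl_cons]
    by_cases h : e = v
    · rw [if_pos (by simp [h]), ih, List.count_cons]
      simp [h]; ring
    · rw [if_neg (by simp [h]), ih, List.count_cons]
      simp [h]

theorem determinar_eq_count (lista : List Int) (e : Int) :
    determinar_repetidos lista e = (lista.count e : Int) := by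
  exact (foldl_count_aux e lista 0).trans (zero_add _)

-- abstract helpers for the proof
def fmax (f : Int → Int) (l : List Int) (a : Int) : Int := l.foldl (fun a e => max a (f e)) a
def fmin (f : Int → Int) (l : List Int) (a : Int) : Int := l.foldl (fun a e => min a (f e)) a

theorem fmax_cons (f : Int → Int) (e : Int) (t : List Int) (a : Int) :
    fmax f (e :: t) a = fmax f t (max a (f e)) := rfl

theorem fmin_cons (f : Int → Int) (e : Int) (t : List Int) (a : Int) :
    fmin f (e :: t) a = fmin f t (min a (f e)) := rfl


theorem fmax_ub (f : Int → Int) : ∀ (l : List Int) (a : Int),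
    a ≤ fmax f l a ∧ ∀ e ∈ l, f e ≤ fmax f l a := by
  intro l
  induction l with
  | nil => intro a; simp [fmax]
  | cons e t ih =>
    intro a
    rw [fmax_cons]
    have h := ih (max a (f e))
    refine ⟨le_trans (le_max_left _ _) h.1, ?_⟩
    intro x hx
    rcases List.mem_cons.mp hx with h1 | h1
    · rw [h1]; exact le_trans (le_max_right _ _) h.1
    · exact h.2 x h1

theorem fmax_const (f : Int → Int) : ∀ (l : List Int) (a : Int),
    (∀ e ∈ l, f e ≤ a) → fmax f l a = a := by
  intro l
  induction l with
  | nil => intro a _; rfl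
  | cons e t ih =>
    intro a h
    rw [fmax_cons, max_eq_left (h e (by simp))]
    exact ih a (fun x hx => h x (List.mem_cons_of_mem _ hx))

theorem fmax_attained (f : Int → Int) : ∀ (l : List Int) (a : Int),
    fmax f l a = a ∨ ∃ e ∈ l, fmax f l a = f e := by
  intro l
  induction l with
  | nil => intro a; left; rfl
  | cons e t ih =>
    intro a
    rw [fmax_cons]
    rcases ih (max a (f e)) with h | ⟨x, hx, hfx⟩
    · rcases le_total (f e) a with hle | hle
      · left; rw [h, max_eq_left hle]
      · right; exact ⟨e, by simp, by rw [h, max_eq_right hle]⟩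
    · right; exact ⟨x, List.mem_cons_of_mem _ hx, hfx⟩

theorem fmin_lb (f : Int → Int) : ∀ (l : List Int) (a : Int),
    fmin f l a ≤ a ∧ ∀ e ∈ l, fmin f l a ≤ f e := by
  intro l
  induction l with
  | nil => intro a; simp [fmin]
  | cons e t ih =>
    intro a
    rw [fmin_cons]
    have h := ih (min a (f e))
    refine ⟨le_trans h.1 (min_le_left _ _), ?_⟩
    intro x hx
    rcases List.mem_cons.mp hx with h1 | h1
    · rw [h1]; exact le_trans h.1 (min_le_right _ _)
    · exact h.2 x h1

theorem fmin_const (f : Int → Int) : ∀ (l : List Int) (a : Int),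
    (∀ e ∈ l, a ≤ f e) → fmin f l a = a := by
  intro l
  induction l with
  | nil => intro a _; rfl
  | cons e t ih =>
    intro a h
    rw [fmin_cons, min_eq_left (h e (by simp))]
    exact ih a (fun x hx => h x (List.mem_cons_of_mem _ hx))

theorem fmin_attained (f : Int → Int) : ∀ (l : List Int) (a : Int),
    fmin f l a = a ∨ ∃ e ∈ l, fmin f l a = f e := by
  intro l
  induction l with
  | nil => intro a; left; rfl
  | cons e t ih =>
    intro a
    rw [fmin_cons]
    rcases ih (min a (f e)) with h | ⟨x, hx, hfx⟩
    · rcases le_total a (f e) with hle | hle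
      · left; rw [h, min_eq_left hle]
      · right; exact ⟨e, by simp, by rw [h, min_eq_right hle]⟩
    · right; exact ⟨x, List.mem_cons_of_mem _ hx, hfx⟩

-- abstract version of B's scan loop
def loc (f : Int → Int) (t : Int) : List Int → Int → Int
  | [], _ => 0
  | x :: rest, i => if f x = t then i else loc f t rest (i + 1)

-- A's loop body specialised to criterio = "max" / "min"
def stepMax (f : Int → Int) (s : Int × Option Int × Option Int × Int) (e : Int) :
    Int × Option Int × Option Int × Int :=
  match s with
  | (i, none, mn, _) => (i + 1, some (f e), mn, i)
  | (i, some m, mn, p) =>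
    if f e > m then (i + 1, some (f e), mn, i) else (i + 1, some m, mn, p)

def stepMin (f : Int → Int) (s : Int × Option Int × Option Int × Int) (e : Int) :
    Int × Option Int × Option Int × Int :=
  match s with
  | (i, mx, none, _) => (i + 1, mx, some (f e), i)
  | (i, mx, some m, p) =>
    if f e < m then (i + 1, mx, some (f e), i) else (i + 1, mx, some m, p)

theorem foldMax (f : Int → Int) : ∀ (l : List Int) (i m p : Int) (mn : Option Int),
    (l.foldl (stepMax f) (i, some m, mn, p)).2.2.2 =
      if ∀ e ∈ l, f e ≤ m then p else loc f (fmax f l m) l i := by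
  intro l
  induction l with
  | nil => intro i m p mn; simp [List.foldl]
  | cons e t ih =>
    intro i m p mn
    rw [List.foldl_cons]
    by_cases hgt : f e > m
    · have hs : stepMax f (i, some m, mn, p) e = (i + 1, some (f e), mn, i) := by
        simp [stepMax, hgt]
      rw [hs, ih]
      have hM : fmax f (e :: t) m = fmax f t (f e) := by
        rw [fmax_cons, max_eq_right (le_of_lt hgt)]
      have hC : ¬ (∀ x ∈ e :: t, f x ≤ m) := fun h =>
        absurd (h e (by simp)) (not_le.mpr hgt)
      rw [if_neg hC]
      by_cases hall : ∀ x ∈ t, f x ≤ f e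
      · rw [if_pos hall]
        have h1 : fmax f (e :: t) m = f e := by rw [hM]; exact fmax_const f t (f e) hall
        rw [h1]
        simp [loc]
      · rw [if_neg hall]
        push_neg at hall
        obtain ⟨x, hx, hxe⟩ := hall
        have hne : ¬ (f e = fmax f (e :: t) m) := by
          rw [hM]
          exact ne_of_lt (lt_of_lt_of_le hxe ((fmax_ub f t (f e)).2 x hx))
        have hloc : loc f (fmax f (e :: t) m) (e :: t) i
            = loc f (fmax f (e :: t) m) t (i + 1) := by
          simp only [loc]; rw [if_neg hne]
        rw [hloc, hM]
    · have hs : stepMax f (i, some m, mn, p) e = (i + 1, some m, mn, p) := by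
        simp [stepMax, hgt]
      rw [hs, ih]
      have hle : f e ≤ m := not_lt.mp hgt
      by_cases hall : ∀ x ∈ t, f x ≤ m
      · rw [if_pos hall, if_pos (by intro x hx; rcases List.mem_cons.mp hx with h1 | h1
                                    · exact h1 ▸ hle
                                    · exact hall x h1)]
      · rw [if_neg hall, if_neg (fun h => hall (fun x hx => h x (List.mem_cons_of_mem _ hx)))]
        push_neg at hall
        obtain ⟨x, hx, hxm⟩ := hall
        have hM : fmax f (e :: t) m = fmax f t m := by
          rw [fmax_cons, max_eq_left hle]
        have hne : ¬ (f e = fmax f (e :: t) m) := by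
          rw [hM]
          exact ne_of_lt (lt_of_le_of_lt hle (lt_of_lt_of_le hxm ((fmax_ub f t m).2 x hx)))
        have hloc : loc f (fmax f (e :: t) m) (e :: t) i
            = loc f (fmax f (e :: t) m) t (i + 1) := by
          simp only [loc]; rw [if_neg hne]
        rw [hloc, hM]

theorem foldMin (f : Int → Int) : ∀ (l : List Int) (i m p : Int) (mx : Option Int),
    (l.foldl (stepMin f) (i, mx, some m, p)).2.2.2 =
      if ∀ e ∈ l, m ≤ f e then p else loc f (fmin f l m) l i := by
  intro l
  induction l with
  | nil => intro i m p mx; simp [List.foldl]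
  | cons e t ih =>
    intro i m p mx
    rw [List.foldl_cons]
    by_cases hlt : f e < m
    · have hs : stepMin f (i, mx, some m, p) e = (i + 1, mx, some (f e), i) := by
        simp [stepMin, hlt]
      rw [hs, ih]
      have hM : fmin f (e :: t) m = fmin f t (f e) := by
        rw [fmin_cons, min_eq_right (le_of_lt hlt)]
      have hC : ¬ (∀ x ∈ e :: t, m ≤ f x) := fun h =>
        absurd (h e (by simp)) (not_le.mpr hlt)
      rw [if_neg hC]
      by_cases hall : ∀ x ∈ t, f e ≤ f x
      · rw [if_pos hall]
        have h1 : fmin f (e :: t) m = f e := by rw [hM]; exact fmin_const f t (f e) hall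
        rw [h1]
        simp [loc]
      · rw [if_neg hall]
        push_neg at hall
        obtain ⟨x, hx, hxe⟩ := hall
        have hne : ¬ (f e = fmin f (e :: t) m) := by
          rw [hM]
          exact (ne_of_lt (lt_of_le_of_lt ((fmin_lb f t (f e)).2 x hx) hxe)).symm
        have hloc : loc f (fmin f (e :: t) m) (e :: t) i
            = loc f (fmin f (e :: t) m) t (i + 1) := by
          simp only [loc]; rw [if_neg hne]
        rw [hloc, hM]
    · have hs : stepMin f (i, mx, some m, p) e = (i + 1, mx, some m, p) := by
        simp [stepMin, hlt]
      rw [hs, ih]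
      have hle : m ≤ f e := not_lt.mp hlt
      by_cases hall : ∀ x ∈ t, m ≤ f x
      · rw [if_pos hall, if_pos (by intro x hx; rcases List.mem_cons.mp hx with h1 | h1
                                    · exact h1 ▸ hle
                                    · exact hall x h1)]
      · rw [if_neg hall, if_neg (fun h => hall (fun x hx => h x (List.mem_cons_of_mem _ hx)))]
        push_neg at hall
        obtain ⟨x, hx, hxm⟩ := hall
        have hM : fmin f (e :: t) m = fmin f t m := by
          rw [fmin_cons, min_eq_left hle]
        have hne : ¬ (f e = fmin f (e :: t) m) := by
          rw [hM]
          exact (ne_of_lt (lt_of_le_of_lt ((fmin_lb f t m).2 x hx) (lt_of_lt_of_le hxm hle))).symm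
        have hloc : loc f (fmin f (e :: t) m) (e :: t) i
            = loc f (fmin f (e :: t) m) t (i + 1) := by
          simp only [loc]; rw [if_neg hne]
        rw [hloc, hM]

-- pasoA specialised to each criterio
theorem pasoA_max (lista : List Int) (s : Int × Option Int × Option Int × Int) (e : Int) :
    pasoA lista "max" s e = stepMax (fun x => (lista.count x : Int)) s e := by
  obtain ⟨i, mx, mn, p⟩ := s
  cases mx <;> simp [pasoA, stepMax, determinar_eq_count]

theorem pasoA_min (lista : List Int) (s : Int × Option Int × Option Int × Int) (e : Int) :
    pasoA lista "min" s e = stepMin (fun x => (lista.count x : Int)) s e := by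
  obtain ⟨i, mx, mn, p⟩ := s
  cases mn <;> simp [pasoA, stepMin, determinar_eq_count]

theorem fold_other (lista : List Int) (criterio : String)
    (h1 : criterio ≠ "max") (h2 : criterio ≠ "min") :
    ∀ (l : List Int) (s : Int × Option Int × Option Int × Int),
      (l.foldl (pasoA lista criterio) s).2.2.2 = s.2.2.2 := by
  intro l
  induction l with
  | nil => intro s; rfl
  | cons e t ih =>
    intro s
    rw [List.foldl_cons, ih]
    simp [pasoA, h1, h2]

-- B's scan equals the abstract scan when the dict agrees with f
theorem pvFindTarget_eq_loc (counts : PySem.Dict Int Int) (f : Int → Int) (T : Int)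
    (hget : ∀ x, counts.getD x 0 = f x) :
    ∀ (l : List Int) (i : Int), pvFindTarget counts T l i = loc f T l i := by
  intro l
  induction l with
  | nil => intro i; rfl
  | cons x rest ih =>
    intro i
    simp only [pvFindTarget, loc, hget, beq_iff_eq, ih]

-- the count dict built by B is Counter(lista)
theorem counts_eq_counter (lista : List Int) :
    lista.foldl (fun d x => d.insert x (d.getD x 0 + 1)) PySem.Dict.empty
      = PySem.Dict.counter lista :=
  PySem.Dict.foldl_insert_getD_add_one_eq_counter lista

-- max/min of the counter's values = running extremum of counts over the list
theorem counter_values_max (x : Int) (t : List Int) :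
    PySem.List.max? (PySem.Dict.counter (x :: t)).values (fun v => v)
      = some (fmax (fun e => ((x :: t).count e : Int)) t (((x :: t).count x : Int))) := by
  set f : Int → Int := fun e => (((x :: t).count e : Int)) with hf
  have hvals : (PySem.Dict.counter (x :: t)).values = (PySem.Set.ofList (x :: t)).map f := by
    show ((PySem.Dict.counter (x :: t)).items).map (·.2) = _
    rw [PySem.Dict.items_counter]
    simp [List.map_map, hf, Function.comp]
  have hmemv : ∀ k ∈ (x :: t), f k ∈ (PySem.Dict.counter (x :: t)).values := by
    intro k hk
    rw [hvals]
    exact List.mem_map_of_mem ((PySem.Set.mem_ofList _ _).mpr hk)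
  cases hmx : PySem.List.max? (PySem.Dict.counter (x :: t)).values (fun v => v) with
  | none =>
    exfalso
    have h0 := (PySem.List.max?_eq_none_iff _ _).mp hmx
    exact absurd (hmemv x (by simp)) (by rw [h0]; simp)
  | some v =>
    have hvmem := PySem.List.max?_mem hmx
    rw [hvals] at hvmem
    obtain ⟨k, hk, hkv⟩ := List.mem_map.mp hvmem
    have hkl : k ∈ (x :: t) := (PySem.Set.mem_ofList _ _).mp hk
    have hub : ∀ e ∈ (x :: t), f e ≤ fmax f t (f x) := by
      intro e he
      rcases List.mem_cons.mp he with h1 | h1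
      · exact h1 ▸ (fmax_ub f t (f x)).1
      · exact (fmax_ub f t (f x)).2 e h1
    have hle1 : v ≤ fmax f t (f x) := hkv ▸ hub k hkl
    have hle2 : fmax f t (f x) ≤ v := by
      rcases fmax_attained f t (f x) with h1 | ⟨e, he, h1⟩
      · rw [h1]; exact PySem.List.max?_isMax hmx (f x) (hmemv x (by simp))
      · rw [h1]; exact PySem.List.max?_isMax hmx (f e) (hmemv e (List.mem_cons_of_mem _ he))
    exact congrArg some (le_antisymm hle2 hle1).symm

theorem counter_values_min (x : Int) (t : List Int) :
    PySem.List.min? (PySem.Dict.counter (x :: t)).values (fun v => v)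
      = some (fmin (fun e => ((x :: t).count e : Int)) t (((x :: t).count x : Int))) := by
  set f : Int → Int := fun e => (((x :: t).count e : Int)) with hf
  have hvals : (PySem.Dict.counter (x :: t)).values = (PySem.Set.ofList (x :: t)).map f := by
    show ((PySem.Dict.counter (x :: t)).items).map (·.2) = _
    rw [PySem.Dict.items_counter]
    simp [List.map_map, hf, Function.comp]
  have hmemv : ∀ k ∈ (x :: t), f k ∈ (PySem.Dict.counter (x :: t)).values := by
    intro k hk
    rw [hvals]
    exact List.mem_map_of_mem ((PySem.Set.mem_ofList _ _).mpr hk)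
  cases hmx : PySem.List.min? (PySem.Dict.counter (x :: t)).values (fun v => v) with
  | none =>
    exfalso
    have h0 := (PySem.List.min?_eq_none_iff _ _).mp hmx
    exact absurd (hmemv x (by simp)) (by rw [h0]; simp)
  | some v =>
    have hvmem := PySem.List.min?_mem hmx
    rw [hvals] at hvmem
    obtain ⟨k, hk, hkv⟩ := List.mem_map.mp hvmem
    have hkl : k ∈ (x :: t) := (PySem.Set.mem_ofList _ _).mp hk
    have hlb : ∀ e ∈ (x :: t), fmin f t (f x) ≤ f e := by
      intro e he
      rcases List.mem_cons.mp he with h1 | h1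
      · exact h1 ▸ (fmin_lb f t (f x)).1
      · exact (fmin_lb f t (f x)).2 e h1
    have hle1 : fmin f t (f x) ≤ v := hkv ▸ hlb k hkl
    have hle2 : v ≤ fmin f t (f x) := by
      rcases fmin_attained f t (f x) with h1 | ⟨e, he, h1⟩
      · rw [h1]; exact PySem.List.min?_isMin hmx (f x) (hmemv x (by simp))
      · rw [h1]; exact PySem.List.min?_isMin hmx (f e) (hmemv e (List.mem_cons_of_mem _ he))
    exact congrArg some (le_antisymm hle2 hle1)

-- ===== VERDICT (by name: the statement is the Claim_ definition above) =====
theorem encontrar_posicion_ocurrencias_spec : Claim_equal_encontrar_posicion_ocurrencias := by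
  unfold Claim_equal_encontrar_posicion_ocurrencias
  intro lista criterio _
  show encontrar_posicion_ocurrencias lista criterio = encontrar_posicion_ocurrencias_alt lista criterio
  by_cases hmax : criterio = "max"
  · subst hmax
    cases lista with
    | nil => rfl
    | cons x t =>
      set f : Int → Int := fun e => (((x :: t).count e : Int)) with hf
      have hA : encontrar_posicion_ocurrencias (x :: t) "max"
          = if ∀ e ∈ t, f e ≤ f x then 0 else loc f (fmax f t (f x)) t 1 := by
        unfold encontrar_posicion_ocurrencias
        rw [List.foldl_cons]
        rw [show pasoA (x :: t) "max" = stepMax f from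
              funext fun s => funext fun e => pasoA_max (x :: t) s e]
        have hstep : stepMax f ((0 : Int), none, none, (0 : Int)) x
            = (1, some (f x), none, 0) := rfl
        rw [hstep, foldMax]
      have hget : ∀ y, (PySem.Dict.counter (x :: t)).getD y 0 = f y := fun y =>
        PySem.Dict.getD_counter (x :: t) y
      unfold encontrar_posicion_ocurrencias_alt
      rw [if_neg (by simp)]
      simp only [counts_eq_counter]
      rw [if_pos (show (("max" : String) == "max") = true from rfl),
        counter_values_max, Option.getD_some]
      rw [pvFindTarget_eq_loc _ f _ hget, hA, ← hf,
        show (((x :: t).count x : Int)) = f x from rfl]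
      by_cases hall : ∀ e ∈ t, f e ≤ f x
      · rw [if_pos hall]
        have hMf : fmax f t (f x) = f x := fmax_const f t (f x) hall
        simp [loc, hMf]
      · rw [if_neg hall]
        push_neg at hall
        obtain ⟨e, he, hgt⟩ := hall
        have hne : ¬ (f x = fmax f t (f x)) :=
          ne_of_lt (lt_of_lt_of_le hgt ((fmax_ub f t (f x)).2 e he))
        simp only [loc, if_neg hne]
        norm_num
  · by_cases hmin : criterio = "min"
    · subst hmin
      cases lista with
      | nil => rfl
      | cons x t =>
        set f : Int → Int := fun e => (((x :: t).count e : Int)) with hf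
        have hA : encontrar_posicion_ocurrencias (x :: t) "min"
            = if ∀ e ∈ t, f x ≤ f e then 0 else loc f (fmin f t (f x)) t 1 := by
          unfold encontrar_posicion_ocurrencias
          rw [List.foldl_cons]
          rw [show pasoA (x :: t) "min" = stepMin f from
                funext fun s => funext fun e => pasoA_min (x :: t) s e]
          have hstep : stepMin f ((0 : Int), none, none, (0 : Int)) x
              = (1, none, some (f x), 0) := rfl
          rw [hstep, foldMin]
        have hget : ∀ y, (PySem.Dict.counter (x :: t)).getD y 0 = f y := fun y =>
          PySem.Dict.getD_counter (x :: t) y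
        unfold encontrar_posicion_ocurrencias_alt
        rw [if_neg (by simp)]
        simp only [counts_eq_counter]
        rw [if_neg (by decide), counter_values_min, Option.getD_some]
        rw [pvFindTarget_eq_loc _ f _ hget, hA, ← hf,
          show (((x :: t).count x : Int)) = f x from rfl]
        by_cases hall : ∀ e ∈ t, f x ≤ f e
        · rw [if_pos hall]
          have hMf : fmin f t (f x) = f x := fmin_const f t (f x) hall
          simp [loc, hMf]
        · rw [if_neg hall]
          push_neg at hall
          obtain ⟨e, he, hlt⟩ := hall
          have hne : ¬ (f x = fmin f t (f x)) :=
            (ne_of_lt (lt_of_le_of_lt ((fmin_lb f t (f x)).2 e he) hlt)).symm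
          simp only [loc, if_neg hne]
          norm_num
    · have hB : encontrar_posicion_ocurrencias_alt lista criterio = 0 := by
        unfold encontrar_posicion_ocurrencias_alt
        rw [if_pos]
        simp [hmax, hmin]
      have hA : encontrar_posicion_ocurrencias lista criterio = 0 :=
        fold_other lista criterio hmax hmin lista (0, none, none, 0)
      rw [hA, hB]
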